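-- pv_equiv track=rewrite | github.com/kdcube/kdcube-ai-app | app/ai-app/src/kdcube-ai-app/kdcube_ai_app/apps/chat/sdk/runtime/diagnose.py | extract_traceback_blocks
-- ===== SOURCE A (Python) =====
-- def extract_traceback_blocks(text: str) -> str:
--     if not text:
--         return ""
--     lines = text.splitlines()
--     blocks: list[str] = []
--     i = 0
--     while i < len(lines):
--         if "Traceback" in lines[i]:
--             block = [lines[i]]
--             i += 1
--             while i < len(lines):
--                 if lines[i].startswith("===== EXECUTION"):
--                     break
--                 if lines[i].startswith("[") and lines[i].endswith("]"):
--                     break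
--                 block.append(lines[i])
--                 i += 1
--             blocks.append("\n".join(block).strip())
--             continue
--         i += 1
--     return "\n\n".join([b for b in blocks if b])
-- ===== SOURCE B (Python) =====
-- def extract_traceback_blocks(text: str) -> str:
--     if not text:
--         return ""
--     lines = text.splitlines()
--     n = len(lines)
--     starts = [i for i, l in enumerate(lines) if "Traceback" in l]
--     stops = [i for i, l in enumerate(lines)
--              if l.startswith("===== EXECUTION") or (l.startswith("[") and l.endswith("]"))]
--     blocks: list[str] = []
--     pos = 0
--     j = 0
--     for s in starts:
--         if s < pos:
--             continue
--         while j < len(stops) and stops[j] <= s: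
--             j += 1
--         e = stops[j] if j < len(stops) else n
--         blocks.append("\n".join(lines[s:e]).strip())
--         pos = e
--     return "\n\n".join(b for b in blocks if b)
-- ===== Notes on version B (the rewrite author's own statement) =====
-- stated objective: alternative
-- what changed: Instead of scanning line-by-line while maintaining an open block (A's nested while loops), B first builds the index lists of Traceback lines and of terminator lines in two comprehension passes, then pairs each eligible start with the first terminator index after it via a merge-style pointer walk and slices the block out of the line list.
import Mathlib
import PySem

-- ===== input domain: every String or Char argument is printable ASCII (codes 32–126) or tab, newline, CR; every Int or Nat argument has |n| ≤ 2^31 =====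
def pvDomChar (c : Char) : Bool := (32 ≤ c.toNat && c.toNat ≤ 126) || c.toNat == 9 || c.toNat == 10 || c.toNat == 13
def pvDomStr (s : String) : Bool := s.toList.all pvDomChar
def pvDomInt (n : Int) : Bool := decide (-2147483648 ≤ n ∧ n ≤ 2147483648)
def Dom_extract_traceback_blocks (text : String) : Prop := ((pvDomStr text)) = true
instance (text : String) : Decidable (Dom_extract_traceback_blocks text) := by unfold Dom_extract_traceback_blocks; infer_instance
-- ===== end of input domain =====

-- B replaces A's line-by-line scan with nested while loops by a staged algorithm: two index-list
-- passes (Traceback lines, terminator lines) followed by a merge-style pairing walk that slices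
-- each block out of the line list (alternative decomposition, same cost).

-- shared line predicates (both Pythons contain these literal tests)
def pvTrac (l : String) : Bool := PySem.Str.isIn "Traceback" l
-- the two break-conditions of A's inner loop, short-circuit combined
def pvIsTerm (l : String) : Bool :=
  PySem.Str.startswith l "===== EXECUTION" ||
  (PySem.Str.startswith l "[" && PySem.Str.endswith l "]")

-- ===== PORT A =====
-- inner while loop: collects block lines until a terminator line (not consumed) or end of input
def pvAInner (block : List String) (rest : List String) : List String × List String :=
  match rest with
  | [] => (block, [])
  | l :: ls => if pvIsTerm l then (block, l :: ls) else pvAInner (block ++ [l]) ls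

theorem pvAInner_len : ∀ (rest block : List String), (pvAInner block rest).2.length ≤ rest.length := by
  intro rest
  induction rest with
  | nil => intro block; simp [pvAInner]
  | cons l ls ih =>
    intro block
    simp only [pvAInner]
    split
    · simp
    · exact le_trans (ih (block ++ [l])) (Nat.le_succ _)

-- outer while loop over the line index
def pvAOuter (blocks : List String) (rest : List String) : List String :=
  match rest with
  | [] => blocks
  | l :: ls =>
    if pvTrac l then
      let p := pvAInner [l] ls
      pvAOuter (blocks ++ [PySem.Str.strip (PySem.Str.join "\n" p.1)]) p.2
    else pvAOuter blocks ls
termination_by rest.length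
decreasing_by
  · exact Nat.lt_succ_of_le (pvAInner_len ls [l])
  · simp

def extract_traceback_blocks (text : String) : String :=
  if text = "" then ""
  else PySem.Str.join "\n\n"
    ((pvAOuter [] (PySem.Str.splitlines text)).filter (fun b => b ≠ ""))

-- ===== PORT B =====
-- the inner 'while j < len(stops) and stops[j] <= s: j += 1' (pointer j = consumed prefix)
def pvBAdvance (stops : List Int) (s : Int) : List Int :=
  match stops with
  | [] => []
  | t :: ts => if t ≤ s then pvBAdvance ts s else t :: ts

-- the 'for s in starts' loop
def pvBLoop (lines : List String) (n : Int) (starts : List Int) (pos : Int)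
    (stops : List Int) (blocks : List String) : List String :=
  match starts with
  | [] => blocks
  | s :: ss =>
    if s < pos then pvBLoop lines n ss pos stops blocks
    else
      let stops' := pvBAdvance stops s
      let e := stops'.headD n
      pvBLoop lines n ss e stops'
        (blocks ++ [PySem.Str.strip (PySem.Str.join "\n"
          (PySem.List.slice lines (some s) (some e)))])

def extract_traceback_blocks_alt (text : String) : String :=
  if text = "" then ""
  else
    let lines := PySem.Str.splitlines text
    let starts := ((PySem.List.enumerate lines 0).filter (fun p => pvTrac p.2)).map (·.1)
    let stops := ((PySem.List.enumerate lines 0).filter (fun p => pvIsTerm p.2)).map (·.1)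
    PySem.Str.join "\n\n"
      ((pvBLoop lines (lines.length : Int) starts 0 stops []).filter (fun b => b ≠ ""))

-- ===== PRECONDITION & SPEC =====
def Spec_extract_traceback_blocks (text : String) (out : String) : Prop := out = extract_traceback_blocks_alt text
instance (text : String) (out : String) : Decidable (Spec_extract_traceback_blocks text out) := by unfold Spec_extract_traceback_blocks; infer_instance

-- ===== CLAIM (what is proved, stated in full; the proofs are below) =====
def Claim_equal_extract_traceback_blocks : Prop := ∀ (text : String), Dom_extract_traceback_blocks text → Spec_extract_traceback_blocks text (extract_traceback_blocks text)

-- ===== LEMMAS AND PROOFS =====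

-- indices (from offset k) of the lines satisfying p: B's two comprehensions, generalised in the offset
def pvIdxs (p : String → Bool) (k : Int) (ls : List String) : List Int :=
  ((PySem.List.enumerate ls k).filter (fun q => p q.2)).map (·.1)

theorem pvIdxs_nil (p : String → Bool) (k : Int) : pvIdxs p k [] = [] := rfl

theorem pvIdxs_cons (p : String → Bool) (k : Int) (l : String) (ls : List String) :
    pvIdxs p k (l :: ls) = (if p l then [k] else []) ++ pvIdxs p (k + 1) ls := by
  simp only [pvIdxs, PySem.List.enumerate_cons, List.filter_cons]
  split <;> simp

theorem pvIdxs_bounds (p : String → Bool) :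
    ∀ (ls : List String) (k : Int), ∀ x ∈ pvIdxs p k ls, k ≤ x ∧ x < k + ls.length := by
  intro ls
  induction ls with
  | nil => intro k x hx; simp [pvIdxs_nil] at hx
  | cons l ls ih =>
    intro k x hx
    rw [pvIdxs_cons] at hx
    rcases List.mem_append.mp hx with h | h
    · split at h <;> simp at h
      subst h
      refine ⟨le_refl _, ?_⟩
      simp only [List.length_cons]; push_cast; omega
    · rcases ih (k + 1) x h with ⟨h1, h2⟩
      refine ⟨by omega, ?_⟩
      simp only [List.length_cons] at h2 ⊢
      push_cast at h2 ⊢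
      omega

theorem pvIdxs_append (p : String → Bool) :
    ∀ (a b : List String) (k : Int),
      pvIdxs p k (a ++ b) = pvIdxs p k a ++ pvIdxs p (k + a.length) b := by
  intro a
  induction a with
  | nil => intro b k; simp [pvIdxs_nil]
  | cons l ls ih =>
    intro b k
    simp only [List.cons_append, pvIdxs_cons, ih]
    simp [add_comm, add_left_comm]

theorem pvIdxs_none (p : String → Bool) :
    ∀ (ls : List String) (k : Int), (∀ l ∈ ls, p l = false) → pvIdxs p k ls = [] := by
  intro ls
  induction ls with
  | nil => intro k _; rfl
  | cons l ls ih =>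
    intro k h
    rw [pvIdxs_cons, h l (by simp), ih (k + 1) (fun x hx => h x (by simp [hx]))]
    simp

-- A's inner loop consumes exactly the terminator-free prefix
theorem pvAInner_eq :
    ∀ (ls acc : List String),
      pvAInner acc ls = (acc ++ ls.takeWhile (fun l => !pvIsTerm l),
                         ls.dropWhile (fun l => !pvIsTerm l)) := by
  intro ls
  induction ls with
  | nil => intro acc; simp [pvAInner]
  | cons l ls ih =>
    intro acc
    by_cases h : pvIsTerm l = true
    · simp [pvAInner, h]
    · simp only [Bool.not_eq_true] at h
      simp [pvAInner, h, ih]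

-- the j-pointer walk skips exactly a ≤ s prefix
theorem pvBAdvance_eq :
    ∀ (u v : List Int) (s : Int), (∀ x ∈ u, x ≤ s) → (∀ y ∈ v, s < y) →
      pvBAdvance (u ++ v) s = v := by
  intro u
  induction u with
  | nil =>
    intro v s _ hv
    cases v with
    | nil => rfl
    | cons y ys =>
      simp only [List.nil_append, pvBAdvance]
      have := hv y (by simp)
      simp [not_le.mpr this]
  | cons x xs ih =>
    intro v s hu hv
    simp only [List.cons_append, pvBAdvance, hu x (by simp), if_true]
    exact ih v s (fun z hz => hu z (by simp [hz])) hv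

-- starts already below pos are skipped one by one
theorem pvBLoop_skip (lines : List String) (n : Int) :
    ∀ (u ss : List Int) (pos : Int) (stops : List Int) (blocks : List String),
      (∀ x ∈ u, x < pos) →
      pvBLoop lines n (u ++ ss) pos stops blocks = pvBLoop lines n ss pos stops blocks := by
  intro u
  induction u with
  | nil => intro ss pos stops blocks _; rfl
  | cons x xs ih =>
    intro ss pos stops blocks h
    simp only [List.cons_append, pvBLoop, h x (by simp), if_true]
    exact ih ss pos stops blocks (fun z hz => h z (by simp [hz]))

-- main invariant: B's pairing walk over the precomputed index lists retraces A's outer loop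
theorem pvMain (lines : List String) :
    ∀ (m : Nat) (ls : List String) (k : Nat) (pos : Int) (sS sE : List Int) (blocks : List String),
      ls.length ≤ m →
      lines.drop k = ls →
      pos ≤ (k : Int) →
      (∀ x ∈ sS, x < pos) →
      (∀ x ∈ sE, x ≤ (k : Int)) →
      pvBLoop lines (lines.length : Int) (sS ++ pvIdxs pvTrac (k : Int) ls) pos
          (sE ++ pvIdxs pvIsTerm (k : Int) ls) blocks
        = pvAOuter blocks ls := by
  intro m
  induction m with
  | zero =>
    intro ls k pos sS sE blocks hm hdrop hpos hS hE
    have : ls = [] := List.eq_nil_of_length_eq_zero (Nat.le_zero.mp hm)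
    subst this
    rw [pvIdxs_nil, pvIdxs_nil, pvBLoop_skip lines _ sS [] pos _ blocks hS]
    simp [pvBLoop, pvAOuter]
  | succ m ih =>
    intro ls k pos sS sE blocks hm hdrop hpos hS hE
    cases ls with
    | nil =>
      rw [pvIdxs_nil, pvIdxs_nil, pvBLoop_skip lines _ sS [] pos _ blocks hS]
      simp [pvBLoop, pvAOuter]
    | cons l ls' =>
      have hdrop' : lines.drop (k + 1) = ls' := by
        have : lines.drop (k + 1) = (lines.drop k).drop 1 := by
          rw [List.drop_drop]
        rw [this, hdrop]; rfl
      by_cases hT : pvTrac l = true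
      · -- a Traceback line: A opens a block; B processes start index k
        -- decompose the tail at the first terminator
        set t := ls'.takeWhile (fun l => !pvIsTerm l) with ht
        set r := ls'.dropWhile (fun l => !pvIsTerm l) with hr
        have hsplit : ls' = t ++ r := (List.takeWhile_append_dropWhile).symm
        have ht_none : ∀ x ∈ t, pvIsTerm x = false := by
          intro x hx
          have := List.mem_takeWhile_imp hx
          simpa using this
        -- lengths
        have hklt : k < lines.length := by
          by_contra h
          have : lines.drop k = [] := List.drop_eq_nil_of_le (le_of_not_gt h)
          rw [hdrop] at this; exact List.cons_ne_nil _ _ this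
        have hlen : lines.length = k + 1 + ls'.length := by
          have h1 : (lines.drop k).length = lines.length - k := by simp
          rw [hdrop] at h1
          simp at h1
          omega
        -- the stop list after the advance
        have hstops : pvBAdvance (sE ++ pvIdxs pvIsTerm (k : Int) (l :: ls')) (k : Int)
            = pvIdxs pvIsTerm ((k : Int) + 1 + t.length) r := by
          rw [pvIdxs_cons, hsplit, pvIdxs_append, ← List.append_assoc, ← List.append_assoc]
          apply pvBAdvance_eq
          · intro x hx
            rcases List.mem_append.mp hx with hx | hx
            · rcases List.mem_append.mp hx with hx | hx
              · exact hE x hx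
              · split at hx <;> simp at hx; omega
            · have := (pvIdxs_bounds pvIsTerm t ((k : Int) + 1) x hx).2
              have ht' := pvIdxs_none pvIsTerm t ((k : Int) + 1) ht_none
              rw [ht'] at hx; simp at hx
          · intro y hy
            have := (pvIdxs_bounds pvIsTerm r ((k : Int) + 1 + t.length) y hy).1
            omega
        -- the end index e
        have he : (pvIdxs pvIsTerm ((k : Int) + 1 + t.length) r).headD (lines.length : Int)
            = (k : Int) + 1 + t.length := by
          cases hrc : r with
          | nil =>
            rw [pvIdxs_nil]
            simp only [List.headD_nil]
            have : ls'.length = t.length := by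
              rw [hsplit, hrc]; simp
            rw [hlen]; push_cast; omega
          | cons hd tl =>
            have hhd : pvIsTerm hd = true := by
              have hcons : ls'.dropWhile (fun l => !pvIsTerm l) = hd :: tl := hr ▸ hrc
              have h2 : (ls'.dropWhile (fun l => !pvIsTerm l)).head? = some hd := by
                rw [hcons]; rfl
              have h3 := List.head?_dropWhile_not (fun l => !pvIsTerm l) ls'
              rw [h2] at h3
              simpa using h3
            rw [pvIdxs_cons, hhd]
            simp
        -- the sliced block equals A's collected block
        have hslice : PySem.List.slice lines (some (k : Int)) (some ((k : Int) + 1 + t.length))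
            = l :: t := by
          have h1 : (k : Int) + 1 + (t.length : Int) = ((k + 1 + t.length : Nat) : Int) := by push_cast; ring
          rw [h1, PySem.List.slice_natCast, hdrop]
          have h2 : k + 1 + t.length - k = 1 + t.length := by omega
          rw [h2]
          simp only [List.take_succ_cons, Nat.add_comm 1 t.length]
          rw [hsplit]
          simp [List.take_left']
        -- A's step
        have hA : pvAOuter blocks (l :: ls')
            = pvAOuter (blocks ++ [PySem.Str.strip (PySem.Str.join "\n" (l :: t))]) r := by
          rw [pvAOuter]
          simp only [hT, if_true, pvAInner_eq]
          rfl
        -- B's step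
        rw [pvIdxs_cons pvTrac]
        simp only [hT, if_true]
        rw [show sS ++ ([(k : Int)] ++ pvIdxs pvTrac ((k : Int) + 1) ls')
              = sS ++ ((k : Int) :: pvIdxs pvTrac ((k : Int) + 1) ls') by simp]
        rw [pvBLoop_skip lines _ sS _ pos _ blocks hS]
        rw [pvBLoop]
        rw [if_neg (by omega)]
        simp only [hstops, he, hslice]
        -- recurse: apply the IH at position k + 1 + |t|
        rw [hA]
        have hdropr : lines.drop (k + 1 + t.length) = r := by
          have : lines.drop (k + 1 + t.length) = (lines.drop (k + 1)).drop t.length := by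
            rw [List.drop_drop]
            try ring_nf
          rw [this, hdrop', hsplit, List.drop_left]
        have hrlen : r.length ≤ m := by
          have : ls'.length = t.length + r.length := by rw [hsplit]; simp
          simp at hm; omega
        have hcast : ((k + 1 + t.length : Nat) : Int) = (k : Int) + 1 + t.length := by push_cast; ring
        have := ih r (k + 1 + t.length) ((k : Int) + 1 + t.length)
          (pvIdxs pvTrac ((k : Int) + 1) t) []
          (blocks ++ [PySem.Str.strip (PySem.Str.join "\n" (l :: t))])
          hrlen hdropr (by rw [hcast])
          (by intro x hx
              have := (pvIdxs_bounds pvTrac t ((k : Int) + 1) x hx).2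
              omega)
          (by intro x hx; simp at hx)
        rw [hcast] at this
        rw [← this]
        congr 1
        rw [hsplit, pvIdxs_append]
      · -- not a Traceback line: A moves on; B's index lists simply shift
        simp only [Bool.not_eq_true] at hT
        rw [pvAOuter]
        simp only [hT, Bool.false_eq_true, if_false]
        rw [pvIdxs_cons pvTrac, pvIdxs_cons pvIsTerm]
        simp only [hT, Bool.false_eq_true, if_false, List.nil_append]
        have hcast : (k : Int) + 1 = ((k + 1 : Nat) : Int) := by push_cast; ring
        rw [hcast]
        have := ih ls' (k + 1) pos sS (sE ++ (if pvIsTerm l then [(k : Int)] else [])) blocks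
          (by simp at hm; omega) hdrop' (by push_cast; omega) hS
          (by intro x hx
              rcases List.mem_append.mp hx with hx | hx
              · have := hE x hx; push_cast; omega
              · split at hx <;> simp at hx; push_cast; omega)
        rw [List.append_assoc] at this
        exact this

-- ===== VERDICT (by name: the statement is the Claim_ definition above) =====
theorem extract_traceback_blocks_spec : Claim_equal_extract_traceback_blocks := by
  intro text _
  unfold Spec_extract_traceback_blocks extract_traceback_blocks extract_traceback_blocks_alt
  by_cases h : text = ""
  · simp [h]
  · simp only [h, if_false]
    congr 1
    congr 1
    have := pvMain (PySem.Str.splitlines text) (PySem.Str.splitlines text).length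
      (PySem.Str.splitlines text) 0 0 [] [] [] (le_refl _) (by simp) (by simp)
      (by intro x hx; simp at hx) (by intro x hx; simp at hx)
    simpa [pvIdxs] using this.symm
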